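-- pv_equiv track=rewrite | github.com/yiyan023/Data-Structures | GCA/Bubble Popping Game.py | solution
-- ===== SOURCE A (Python) =====
-- def solution(grid: list[list[int]], operations: list):
--     directions = [1, -1]
--
--     def is_valid(r: int, c: int):
--         return 0 <= r < len(grid) and 0 <= c < len(grid[0])
--
--     def swap_column_values(c: int):
--         l = len(grid) - 1
--         hasSpace = False
--
--         for r in range(len(grid)-1, -1, -1):
--             if hasSpace:
--                 if not grid[r][c]:
--                     continue
--
--                 grid[l][c], grid[r][c] = grid[r][c], grid[l][c]
--                 l -= 1
--
--             elif not grid[r][c]: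
--                 hasSpace = True
--                 l = r
--
--     for r, c in operations:
--         left_pops = 0
--         right_pops = 0
--
--         for dr in directions:
--             new_r, new_c = r + dr, c - 1
--
--             if is_valid(new_r, new_c) and grid[new_r][new_c] == grid[r][c]:
--                 grid[new_r][new_c] = 0
--                 left_pops += 1
--
--         for dr in directions:
--             new_r, new_c = r + dr, c + 1
--
--             if is_valid(new_r, new_c) and grid[new_r][new_c] == grid[r][c]:
--                 grid[new_r][new_c] = 0
--                 right_pops += 1
--
--         if left_pops:
--             swap_column_values(c-1)
--
--         if right_pops:
--             swap_column_values(c+1)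
--
--         grid[r][c] = 0
--         swap_column_values(c)
--
--     return grid
-- ===== SOURCE B (Python) =====
-- def solution(grid: list[list[int]], operations: list):
--     rows = len(grid)
--
--     def pop_matches(cells, v):
--         popped = 0
--         for nr, nc in cells:
--             if 0 <= nr < rows and 0 <= nc < len(grid[0]) and grid[nr][nc] == v:
--                 grid[nr][nc] = 0
--                 popped += 1
--         return popped
--
--     def apply_gravity(c):
--         keep = [row[c] for row in grid if row[c] != 0]
--         pad = rows - len(keep)
--         for i, row in enumerate(grid):
--             row[c] = 0 if i < pad else keep[i - pad]
--
--     for r, c in operations: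
--         v = grid[r][c]
--         left = pop_matches([(r + 1, c - 1), (r - 1, c - 1)], v)
--         right = pop_matches([(r + 1, c + 1), (r - 1, c + 1)], v)
--         if left:
--             apply_gravity(c - 1)
--         if right:
--             apply_gravity(c + 1)
--         grid[r][c] = 0
--         apply_gravity(c)
--     return grid
-- ===== Notes on version B (the rewrite author's own statement) =====
-- stated objective: simpler
-- what changed: Gravity is re-implemented by rebuilding each affected column (read it, filter out zeros, write zeros on top then the survivors in order) instead of A's bottom-up two-pointer in-place swap loop, and pop detection becomes a small counting helper over explicit neighbour coordinates instead of a directions list with an is_valid closure.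
-- outside the precondition, e.g. on solution([[1, 2], [3, 4]], [[-1, 0]]): A returns [[0, 2], [1, 4]], B returns [[0, 2], [1, 4]]
import Mathlib
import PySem

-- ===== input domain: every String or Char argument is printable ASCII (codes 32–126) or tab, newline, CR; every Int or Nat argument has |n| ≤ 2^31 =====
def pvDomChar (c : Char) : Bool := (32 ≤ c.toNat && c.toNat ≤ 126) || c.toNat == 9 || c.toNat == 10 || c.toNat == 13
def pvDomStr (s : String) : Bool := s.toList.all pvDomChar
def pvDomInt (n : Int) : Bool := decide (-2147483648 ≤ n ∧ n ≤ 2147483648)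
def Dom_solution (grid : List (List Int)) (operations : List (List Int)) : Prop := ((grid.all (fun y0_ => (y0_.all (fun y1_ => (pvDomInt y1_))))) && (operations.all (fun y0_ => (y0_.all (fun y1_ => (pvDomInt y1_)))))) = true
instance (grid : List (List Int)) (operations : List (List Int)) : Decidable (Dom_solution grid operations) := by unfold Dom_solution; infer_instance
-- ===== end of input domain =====

-- B rebuilds each affected column (filter out zeros, zeros on top, survivors below) instead of A's
-- bottom-up two-pointer in-place swap gravity; simpler decomposition, same cost. Both Pythons mutate
-- `grid` in place identically on inputs satisfying Pre_; the theorems are about the returned value.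

-- shared cell primitives: grid[r][c] read / write; exact (incl. negative-index wrap) wherever the
-- Python expression returns, the `.getD` defaults are reached only where Python raises (outside Pre_)
def cellGet (g : List (List Int)) (r c : Int) : Int :=
  (PySem.List.pyGet? ((PySem.List.pyGet? g r).getD []) c).getD 0
def cellSet (g : List (List Int)) (r c : Int) (v : Int) : List (List Int) :=
  PySem.List.pySetD g r (PySem.List.pySetD ((PySem.List.pyGet? g r).getD []) c v)

-- ===== PORT A =====
def isValid (g : List (List Int)) (r c : Int) : Bool :=
  decide (0 ≤ r) && decide (r < (g.length : Int)) && decide (0 ≤ c) &&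
    decide (c < (((PySem.List.pyGet? g 0).getD []).length : Int))

def swapStep (c : Int) (st : Int × Bool × List (List Int)) (r : Int) : Int × Bool × List (List Int) :=
  match st with
  | (l, hasSpace, g) =>
    if hasSpace then
      if cellGet g r c = 0 then (l, hasSpace, g)
      else (l - 1, hasSpace, cellSet (cellSet g l c (cellGet g r c)) r c (cellGet g l c))
    else if cellGet g r c = 0 then (r, true, g)
    else (l, hasSpace, g)

def swapColumnValues (g : List (List Int)) (c : Int) : List (List Int) :=
  ((PySem.List.pyRange ((g.length : Int) - 1) (-1) (-1)).foldl (swapStep c)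
    ((g.length : Int) - 1, false, g)).2.2

def popStep (r c nc : Int) (st : Int × List (List Int)) (dr : Int) : Int × List (List Int) :=
  match st with
  | (pops, g) =>
    let newR := r + dr
    if isValid g newR nc && (cellGet g newR nc == cellGet g r c)
    then (pops + 1, cellSet g newR nc 0)
    else (pops, g)

def opStepA (g : List (List Int)) (op : List Int) : List (List Int) :=
  let r := (PySem.List.pyGet? op 0).getD 0
  let c := (PySem.List.pyGet? op 1).getD 0
  let lp := [(1 : Int), -1].foldl (popStep r c (c - 1)) (0, g)
  let rp := [(1 : Int), -1].foldl (popStep r c (c + 1)) (0, lp.2)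
  let g3 := if lp.1 = 0 then rp.2 else swapColumnValues rp.2 (c - 1)
  let g4 := if rp.1 = 0 then g3 else swapColumnValues g3 (c + 1)
  swapColumnValues (cellSet g4 r c 0) c

def solution (grid : List (List Int)) (operations : List (List Int)) : List (List Int) :=
  operations.foldl opStepA grid

-- ===== PORT B =====
def popMatches (g : List (List Int)) (rows : Int) (cells : List (Int × Int)) (v : Int) :
    Int × List (List Int) :=
  cells.foldl (fun st cell =>
    match st, cell with
    | (popped, g), (nr, nc) =>
      if decide (0 ≤ nr) && decide (nr < rows) && decide (0 ≤ nc) &&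
          decide (nc < (((PySem.List.pyGet? g 0).getD []).length : Int)) &&
          (cellGet g nr nc == v)
      then (popped + 1, cellSet g nr nc 0)
      else (popped, g)) (0, g)

def applyGravity (rows : Int) (g : List (List Int)) (c : Int) : List (List Int) :=
  let keep := (g.filter (fun row => (PySem.List.pyGet? row c).getD 0 != 0)).map
    (fun row => (PySem.List.pyGet? row c).getD 0)
  let pad : Int := rows - keep.length
  (PySem.List.enumerate g).map (fun p =>
    PySem.List.pySetD p.2 c (if p.1 < pad then 0 else (PySem.List.pyGet? keep (p.1 - pad)).getD 0))

def opStepB (rows : Int) (g : List (List Int)) (op : List Int) : List (List Int) :=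
  let r := (PySem.List.pyGet? op 0).getD 0
  let c := (PySem.List.pyGet? op 1).getD 0
  let v := cellGet g r c
  let p1 := popMatches g rows [(r + 1, c - 1), (r - 1, c - 1)] v
  let p2 := popMatches p1.2 rows [(r + 1, c + 1), (r - 1, c + 1)] v
  let g3 := if p1.1 = 0 then p2.2 else applyGravity rows p2.2 (c - 1)
  let g4 := if p2.1 = 0 then g3 else applyGravity rows g3 (c + 1)
  applyGravity rows (cellSet g4 r c 0) c

def solution_alt (grid : List (List Int)) (operations : List (List Int)) : List (List Int) :=
  operations.foldl (opStepB (grid.length : Int)) grid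

-- ===== PRECONDITION & SPEC =====
-- Pre_ restricts operations to the game's natural coordinate domain: each operation is a pair
-- [r, c] with 0 ≤ r < len(grid) and 0 ≤ c < len(grid[0]), and no row shorter than row 0. Outside
-- it A raises (ValueError/IndexError) on most inputs; it also excludes operations with negative
-- coordinates, where Python's negative-index wraparound lets A return a value (B returns the
-- identical value there in Python, but such coordinates are outside the game's domain).
def Pre_solution (grid : List (List Int)) (operations : List (List Int)) : Prop :=
  ∀ op ∈ operations, op.length = 2 ∧ 0 ≤ op.getD 0 0 ∧ op.getD 0 0 < (grid.length : Int) ∧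
    0 ≤ op.getD 1 0 ∧ op.getD 1 0 < ((grid.headD []).length : Int) ∧
    ∀ row ∈ grid, (grid.headD []).length ≤ row.length
instance (grid : List (List Int)) (operations : List (List Int)) : Decidable (Pre_solution grid operations) := by
  unfold Pre_solution; infer_instance

def pvWitness_solution : List (List Int) × List (List Int) :=
  ([[1, 1, 2], [2, 1, 2], [3, 3, 3]], [[1, 1], [2, 0]])

def Spec_solution (grid : List (List Int)) (operations : List (List Int)) (out : List (List Int)) : Prop :=
  out = solution_alt grid operations
instance (grid : List (List Int)) (operations : List (List Int)) (out : List (List Int)) : Decidable (Spec_solution grid operations out) := by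
  unfold Spec_solution; infer_instance

-- ===== CLAIM (what is proved, stated in full; the proofs are below) =====
def Claim_equal_solution : Prop := ∀ (grid : List (List Int)) (operations : List (List Int)), Dom_solution grid operations → Pre_solution grid operations → Spec_solution grid operations (solution grid operations)

-- ===== LEMMAS AND PROOFS =====

-- width of the grid as both ports read it: len(grid[0])
def widthOf (g : List (List Int)) : Nat := ((PySem.List.pyGet? g 0).getD []).length

-- column c of g, and "g with column c replaced by col"
def colOf (g : List (List Int)) (c : Nat) : List Int := g.map (fun row => row.getD c 0)
def Zc (g : List (List Int)) (c : Nat) (col : List Int) : List (List Int) :=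
  List.zipWith (fun row v => row.set c v) g col

-- the reversed row range [n-1, …, s]
def Lr (n s : Nat) : List Int := (List.range' s (n - s)).reverse.map Int.ofNat

lemma map_length_Zc (g : List (List Int)) (c : Nat) (col : List Int) (h : col.length = g.length) :
    (Zc g c col).map List.length = g.map List.length := by
  apply List.ext_getElem <;> simp [Zc, h]

lemma Zc_colOf (g : List (List Int)) (c : Nat) (hc : ∀ row ∈ g, c < row.length) :
    Zc g c (colOf g c) = g := by
  apply List.ext_getElem
  · simp [Zc, colOf]
  · intro i h1 h2
    have hci : c < g[i].length := hc _ (by simp)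
    simp [Zc, colOf, List.getElem?_eq_getElem hci]

lemma cellGet_eq (g : List (List Int)) (j c : Nat) (hj : j < g.length) (hc : c < g[j].length) :
    cellGet g (j : Int) (c : Int) = g[j][c] := by
  simp [cellGet, PySem.List.pyGet?_natCast, List.getElem?_eq_getElem hj,
    List.getElem?_eq_getElem hc]

lemma cellGet_Zc (g : List (List Int)) (c : Nat) (col : List Int) (h : col.length = g.length)
    (hc : ∀ row ∈ g, c < row.length) (j : Nat) (hj : j < g.length) :
    cellGet (Zc g c col) (j : Int) (c : Int) = col[j]'(by omega) := by
  have hjz : j < (Zc g c col).length := by simp [Zc]; omega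
  have hjc : j < col.length := by omega
  have hci : c < g[j].length := hc _ (by simp)
  have hz : (Zc g c col)[j]'hjz = (g[j].set c (col[j]'hjc)) := by simp [Zc]
  have hcs : c < (g[j].set c (col[j]'hjc)).length := by simpa using hci
  simp [cellGet, PySem.List.pyGet?_natCast, List.getElem?_eq_getElem hjz, hz,
    List.getElem?_eq_getElem hcs]

lemma cellSet_Zc (g : List (List Int)) (c : Nat) (col : List Int) (h : col.length = g.length)
    (j : Nat) (hj : j < g.length) (v : Int) :
    cellSet (Zc g c col) (j : Int) (c : Int) v = Zc g c (col.set j v) := by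
  have hjz : j < (Zc g c col).length := by simp [Zc]; omega
  have hjc : j < col.length := by omega
  have hz : (Zc g c col)[j]'hjz = (g[j].set c (col[j]'hjc)) := by simp [Zc]
  rw [cellSet, PySem.List.pySetD_of_nonneg _ _ (Int.natCast_nonneg _),
    PySem.List.pySetD_of_nonneg _ _ (Int.natCast_nonneg _)]
  simp only [PySem.List.pyGet?_natCast, List.getElem?_eq_getElem hjz, Option.getD_some,
    Int.toNat_natCast, hz, List.set_set]
  apply List.ext_getElem
  · simp [Zc, h]
  · intro i hi1 hi2
    by_cases hij : i = j
    · subst hij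
      simp [Zc]
    · have hji : j ≠ i := fun hh => hij hh.symm
      simp [Zc, hji]

lemma map_length_cellSet (g : List (List Int)) (i j v : Int) (hi : 0 ≤ i) :
    (cellSet g i j v).map List.length = g.map List.length := by
  rw [cellSet, PySem.List.pySetD_of_nonneg _ _ hi, List.map_set]
  by_cases h : i.toNat < g.length
  · rw [PySem.List.pyGet?_of_nonneg _ hi, List.getElem?_eq_getElem h]
    simp only [Option.getD_some, PySem.List.length_pySetD]
    rw [← List.getElem_map (f := List.length) (h := by simpa using h)]
    exact List.set_getElem_self _
  · rw [List.set_eq_of_length_le (by simpa using not_lt.mp h)]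

lemma cellGet_cellSet_ne (g : List (List Int)) (i j r c v : Int) (hi : 0 ≤ i) (hr : 0 ≤ r)
    (hne : r ≠ i) : cellGet (cellSet g i j v) r c = cellGet g r c := by
  rw [cellGet, cellGet, cellSet, PySem.List.pySetD_of_nonneg _ _ hi,
    PySem.List.pyGet?_of_nonneg _ hr, PySem.List.pyGet?_of_nonneg _ hr,
    List.getElem?_set_ne (by omega)]

lemma Lr_top (n : Nat) : Lr n n = [] := by simp [Lr]

lemma Lr_succ (n s : Nat) (h : s < n) : Lr n s = Lr n (s + 1) ++ [(s : Int)] := by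
  unfold Lr
  have h1 : n - s = (n - (s + 1)) + 1 := by omega
  rw [h1, List.range'_succ]
  simp

lemma pyRange_eq_Lr (n : Nat) : PySem.List.pyRange ((n : Int) - 1) (-1) (-1) = Lr n 0 := by
  unfold PySem.List.pyRange Lr
  rcases Nat.eq_zero_or_pos n with h | h
  · subst h; norm_num
  · have hlt : (-1 : Int) < (n : Int) - 1 := by omega
    rw [if_neg (by norm_num), if_neg (by norm_num), if_pos hlt]
    have hcount : (((n : Int) - 1 - -1 + - -1 - 1) / - -1).toNat = n := by norm_num
    rw [hcount]
    apply List.ext_getElem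
    · simp
    · intro i hi1 hi2
      have hin : i < n := by simpa using hi1
      have hrev : (List.range' 0 (n - 0)).reverse[i]'(by simp [hin]) = n - 1 - i := by
        rw [List.getElem_reverse]
        simp
      rw [List.getElem_map, List.getElem_map, List.getElem_range, hrev,
        Int.ofNat_eq_natCast]
      omega

lemma stage_swap_list (a : List Int) (z : Nat) (b : List Int) (x v : Int) (hz : 0 < z) :
    (((a ++ [x]) ++ (List.replicate z 0 ++ b)).set (a.length + z) v).set a.length 0 =
      a ++ (List.replicate z 0 ++ (v :: b)) := by
  obtain ⟨m, rfl⟩ : ∃ m, z = m + 1 := ⟨z - 1, by omega⟩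
  rw [List.set_append_right _ _ (by simp only [List.length_append, List.length_cons, List.length_nil]; omega)]
  have h1 : a.length + (m + 1) - (a ++ [x]).length = m := by
    simp only [List.length_append, List.length_cons, List.length_nil]; omega
  rw [h1]
  rw [List.set_append_left _ _ (by simp only [List.length_append, List.length_cons, List.length_nil]; omega)]
  have h2 : (List.replicate (m + 1) (0 : Int) ++ b).set m v =
      (List.replicate m 0 ++ [v]) ++ b := by
    rw [List.set_append_left _ _ (by simp only [List.length_replicate]; omega),
      List.replicate_succ' (n := m), List.set_append_right _ _ (by simp),
      List.length_replicate, Nat.sub_self]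
    simp
  have h3 : (a ++ [x]).set a.length 0 = a ++ [(0 : Int)] := by
    rw [List.set_append_right _ _ le_rfl, Nat.sub_self, List.set_cons_zero]
  rw [h2, h3]
  simp [List.replicate_succ]

lemma swapStep_true (c l r : Int) (G : List (List Int)) : swapStep c (l, true, G) r =
    (if cellGet G r c = 0 then (l, true, G)
     else (l - 1, true, cellSet (cellSet G l c (cellGet G r c)) r c (cellGet G l c))) := rfl

lemma swapStep_false (c l r : Int) (G : List (List Int)) : swapStep c (l, false, G) r =
    (if cellGet G r c = 0 then (r, true, G) else (l, false, G)) := rfl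

lemma swap_inv (g : List (List Int)) (c : Nat) (hc : ∀ row ∈ g, c < row.length)
    (k : Nat) : ∀ s, s + k = g.length →
    (Lr g.length s).foldl (swapStep (c : Int)) (((g.length : Int) - 1), false, g) =
      (if ((colOf g c).drop s).countP (fun v => v == 0) = 0 then
        (((g.length : Int) - 1), false, g)
      else ((s : Int) + (((colOf g c).drop s).countP (fun v => v == 0) : Int) - 1, true,
        Zc g c ((colOf g c).take s ++
          (List.replicate (((colOf g c).drop s).countP (fun v => v == 0)) 0 ++
          ((colOf g c).drop s).filter (fun v => v != 0))))) := by
  have hcol : (colOf g c).length = g.length := by simp [colOf]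
  induction k with
  | zero =>
    intro s hs
    have hsn : s = g.length := by omega
    subst hsn
    rw [Lr_top, List.foldl_nil, if_pos (by rw [List.drop_of_length_le (by omega)]; rfl)]
  | succ k ih =>
    intro s hs
    have hsn : s < g.length := by omega
    have hsc : s < (colOf g c).length := by omega
    rw [Lr_succ _ s hsn, List.foldl_append, ih (s+1) (by omega), List.foldl_cons, List.foldl_nil]
    set col := colOf g c with hcoldef
    set z' := ((col.drop (s+1)).countP (fun v => v == 0)) with hz'
    set keep := ((col.drop (s+1)).filter (fun v => v != 0)) with hkeepdef
    have hdrop : col.drop s = (col[s]'hsc) :: col.drop (s+1) := List.drop_eq_getElem_cons hsc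
    have hzk : z' + keep.length = g.length - (s+1) := by
      have h1 : keep.length = (col.drop (s+1)).countP (fun v => v != 0) := by
        rw [hkeepdef, ← List.countP_eq_length_filter]
      have h2 : (col.drop (s+1)).length = g.length - (s+1) := by
        rw [List.length_drop, hcol]
      have h3 : (col.drop (s+1)).countP (fun v => v == 0) +
          (col.drop (s+1)).countP (fun v => v != 0) = (col.drop (s+1)).length := by
        have := List.length_eq_countP_add_countP (l := col.drop (s+1)) (p := fun v => v == 0)
        simpa [bne] using this.symm
      omega
    have hcnt : (col.drop s).countP (fun v => v == 0) =
        (if col[s]'hsc == 0 then 1 else 0) + z' := by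
      rw [hdrop, List.countP_cons]
      split_ifs <;> simp_all <;> omega
    have hcs : c < g[s].length := hc _ (by simp)
    have hcolg : col[s]'hsc = g[s][c] := by
      simp [hcoldef, colOf, List.getD_eq_getElem?_getD, List.getElem?_eq_getElem hcs]
    have hget : cellGet g (s : Int) (c : Int) = col[s]'hsc := by
      rw [cellGet_eq g s c hsn hcs, hcolg]
    have htake : col.take (s+1) = col.take s ++ [col[s]'hsc] := by
      rw [List.take_add_one, List.getElem?_eq_getElem hsc]
      rfl
    have hsplit : col.take s ++ ((col[s]'hsc) :: col.drop (s+1)) = col := by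
      conv_rhs => rw [← List.take_append_drop s col]
      rw [hdrop]
    by_cases hz0 : z' = 0
    · rw [if_pos hz0]
      rw [swapStep_false]
      by_cases hv : col[s]'hsc = 0
      · rw [if_pos (by rw [hget]; exact hv)]
        rw [if_neg (by rw [hcnt, if_pos (by simp [hv])]; omega)]
        rw [hcnt, if_pos (by simp [hv])]
        have hkeq : keep = col.drop (s+1) := by
          rw [hkeepdef]
          apply List.filter_eq_self.mpr
          intro a ha
          have := List.countP_eq_zero.mp hz0 a ha
          simpa [bne] using this
        have hstage : col.take s ++ (List.replicate (1 + z') 0 ++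
            (col.drop s).filter (fun v => v != 0)) = col := by
          rw [hdrop, List.filter_cons, if_neg (by simp [hv]), ← hkeepdef, hkeq, hz0]
          simpa [hv] using hsplit
        rw [hstage, hcoldef, Zc_colOf g c hc]
        exact Prod.ext (by push_cast; omega) rfl
      · rw [if_neg (by rw [hget]; exact hv)]
        rw [if_pos (by rw [hcnt, if_neg (by simp [hv])]; omega)]
    · rw [if_neg hz0]
      set st' := col.take (s+1) ++ (List.replicate z' 0 ++ keep) with hst'
      have hstlen : st'.length = g.length := by
        rw [hst']
        simp only [List.length_append, List.length_take, List.length_replicate]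
        omega
      have htlen : (col.take s).length = s := by simp [hcol]; omega
      show swapStep (c : Int) (((s + 1 : Nat) : Int) + (z' : Int) - 1, true, Zc g c st') (s : Int) = _
      rw [swapStep_true]
      have hgetS : cellGet (Zc g c st') (s : Int) (c : Int) = col[s]'hsc := by
        rw [cellGet_Zc g c st' hstlen hc s hsn,
          List.getElem_of_eq (by rw [hst', htake]) (by omega),
          List.getElem_append_left (by simp only [List.length_append, List.length_cons, List.length_nil, htlen]; omega),
          List.getElem_append_right (by omega)]
        simp [htlen]
      by_cases hv : col[s]'hsc = 0
      · rw [if_pos (by rw [hgetS]; exact hv)]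
        rw [if_neg (by rw [hcnt, if_pos (by simp [hv])]; omega)]
        rw [hcnt, if_pos (by simp [hv])]
        have hlist : st' = col.take s ++ (List.replicate (1 + z') 0 ++
            (col.drop s).filter (fun v => v != 0)) := by
          rw [hdrop, List.filter_cons, if_neg (by simp [hv]), ← hkeepdef]
          rw [hst', htake, hv]
          have : List.replicate (1 + z') (0 : Int) = 0 :: List.replicate z' 0 := by
            rw [Nat.add_comm, List.replicate_succ]
          rw [this]
          simp
        rw [← hlist]
        exact Prod.ext (by push_cast; omega) rfl
      · rw [if_neg (by rw [hgetS]; exact hv)]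
        rw [if_neg (by rw [hcnt, if_neg (by simp [hv])]; omega)]
        rw [hcnt, if_neg (by simp [hv]), Nat.zero_add]
        have hz'pos : 0 < z' := Nat.pos_of_ne_zero hz0
        have hszlt : s + z' < g.length := by omega
        have hl' : ((s + 1 : Nat) : Int) + (z' : Int) - 1 = ((s + z' : Nat) : Int) := by
          push_cast; ring
        rw [hl']
        have hstsz : st'[s + z']'(by omega) = 0 := by
          rw [List.getElem_of_eq (by rw [hst', htake]) (by omega),
            List.getElem_append_right (by simp only [List.length_append, List.length_cons, List.length_nil, htlen]; omega),
            List.getElem_append_left (by simp only [List.length_append, List.length_cons, List.length_nil, List.length_replicate, htlen]; omega)]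
          apply List.getElem_replicate
        rw [cellGet_Zc g c st' hstlen hc (s + z') hszlt, hstsz, hgetS]
        rw [cellSet_Zc g c st' hstlen (s + z') hszlt _]
        rw [cellSet_Zc g c (st'.set (s + z') (col[s]'hsc)) (by rw [List.length_set]; exact hstlen) s hsn _]
        have hsurgery := stage_swap_list (col.take s) z' keep (col[s]'hsc) (col[s]'hsc) hz'pos
        rw [htlen] at hsurgery
        have hst2 : st' = (col.take s ++ [col[s]'hsc]) ++ (List.replicate z' 0 ++ keep) := by
          rw [hst', htake]
        rw [hst2, hsurgery]
        have hflt : (col.drop s).filter (fun v => v != 0) = (col[s]'hsc) :: keep := by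
          rw [hdrop, List.filter_cons, if_pos (by simp [hv]), ← hkeepdef]
        rw [hflt]
        exact Prod.ext (by push_cast; omega) rfl

lemma swap_closed (g : List (List Int)) (c : Nat) (hc : ∀ row ∈ g, c < row.length) :
    swapColumnValues g (c : Int) =
      Zc g c (List.replicate ((colOf g c).countP (fun v => v == 0)) 0 ++
        (colOf g c).filter (fun v => v != 0)) := by
  unfold swapColumnValues
  rw [pyRange_eq_Lr g.length, swap_inv g c hc g.length 0 (by omega)]
  simp only [List.drop_zero, List.take_zero, List.nil_append]
  by_cases hz : (colOf g c).countP (fun v => v == 0) = 0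
  · rw [if_pos hz, hz]
    have hfe : (colOf g c).filter (fun v => v != 0) = colOf g c := by
      apply List.filter_eq_self.mpr
      intro a ha
      have := List.countP_eq_zero.mp hz a ha
      simpa [bne] using this
    simp only [List.replicate_zero, List.nil_append, hfe]
    exact (Zc_colOf g c hc).symm
  · rw [if_neg hz]

lemma gravity_closed (g : List (List Int)) (c : Nat) (hc : ∀ row ∈ g, c < row.length) :
    applyGravity (g.length : Int) g (c : Int) =
      Zc g c (List.replicate (g.length - ((colOf g c).filter (fun v => v != 0)).length) 0 ++
        (colOf g c).filter (fun v => v != 0)) := by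
  unfold applyGravity
  simp only []
  have hkeep : (g.filter (fun row => (PySem.List.pyGet? row (c : Int)).getD 0 != 0)).map
      (fun row => (PySem.List.pyGet? row (c : Int)).getD 0) = (colOf g c).filter (fun v => v != 0) := by
    rw [colOf, List.filter_map]
    simp [Function.comp_def, List.getD_eq_getElem?_getD]
  rw [hkeep]
  set keep := (colOf g c).filter (fun v => v != 0) with hk
  have hkl : keep.length ≤ g.length := by
    calc keep.length ≤ (colOf g c).length := List.length_filter_le _ _
    _ = g.length := by simp [colOf]
  set padN : Nat := g.length - keep.length with hpadN
  apply List.ext_getElem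
  · simp [Zc, PySem.List.length_enumerate]
    omega
  · intro i hi1 hi2
    have hig : i < g.length := by simpa [PySem.List.length_enumerate] using hi1
    rw [List.getElem_map, PySem.List.getElem_enumerate]
    have hrow : c < g[i].length := hc _ (by simp)
    have hznth : (Zc g c (List.replicate padN 0 ++ keep))[i]'hi2 =
        g[i].set c ((List.replicate padN 0 ++ keep)[i]'(by simp; omega)) := by
      simp [Zc]
    rw [hznth]
    simp only [zero_add]
    rw [PySem.List.pySetD_of_nonneg _ _ (Int.natCast_nonneg _), Int.toNat_natCast]
    congr 1
    by_cases hlt : i < padN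
    · rw [if_pos (by omega), List.getElem_append_left (by simpa)]
      simp
    · rw [if_neg (by omega)]
      have hcast : (i : Int) - ((g.length : Int) - (keep.length : Int)) = ((i - padN : Nat) : Int) := by omega
      rw [hcast, PySem.List.pyGet?_natCast, List.getElem?_eq_getElem (by omega),
        Option.getD_some, List.getElem_append_right (by simpa using hlt)]
      simp

lemma swap_eq_gravity (g : List (List Int)) (c : Nat) (hc : ∀ row ∈ g, c < row.length) :
    swapColumnValues g (c : Int) = applyGravity (g.length : Int) g (c : Int) := by
  have h1 : ((colOf g c).filter (fun v => v != 0)).length =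
      (colOf g c).countP (fun v => v != 0) := List.countP_eq_length_filter.symm
  have h2 : (colOf g c).countP (fun v => v == 0) + (colOf g c).countP (fun v => v != 0) =
      (colOf g c).length := by
    have := List.length_eq_countP_add_countP (l := colOf g c) (p := fun v => v == 0)
    simpa [bne] using this.symm
  have h3 : (colOf g c).length = g.length := by simp [colOf]
  have hco : (colOf g c).countP (fun v => v == 0) =
      g.length - ((colOf g c).filter (fun v => v != 0)).length := by omega
  rw [swap_closed g c hc, gravity_closed g c hc, hco]

lemma map_length_gravity (g : List (List Int)) (c : Nat) (hc : ∀ row ∈ g, c < row.length) :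
    (applyGravity (g.length : Int) g (c : Int)).map List.length = g.map List.length := by
  rw [gravity_closed g c hc]
  apply map_length_Zc
  have h1 : ((colOf g c).filter (fun v => v != 0)).length ≤ g.length := by
    calc ((colOf g c).filter (fun v => v != 0)).length ≤ (colOf g c).length :=
      List.length_filter_le _ _
    _ = g.length := by simp [colOf]
  simp only [List.length_append, List.length_replicate]
  omega

lemma widthOf_mapLen (g : List (List Int)) : widthOf g = ((g.map List.length)[0]?).getD 0 := by
  cases g with
  | nil => simp [widthOf, PySem.List.pyGet?]
  | cons a l => rw [widthOf, PySem.List.pyGet?_zero]; simp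

lemma widthOf_congr (g g0 : List (List Int)) (h : g.map List.length = g0.map List.length) :
    widthOf g = widthOf g0 := by
  rw [widthOf_mapLen, widthOf_mapLen, h]

lemma len_congr (g g0 : List (List Int)) (h : g.map List.length = g0.map List.length) :
    ((g0.length : Int)) = (g.length : Int) := by
  have := congrArg List.length h
  simp only [List.length_map] at this
  omega

lemma popStep_def (r c nc p : Int) (g : List (List Int)) (dr : Int) :
    popStep r c nc (p, g) dr =
      (if isValid g (r + dr) nc && (cellGet g (r + dr) nc == cellGet g r c)
       then (p + 1, cellSet g (r + dr) nc 0) else (p, g)) := rfl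

lemma popPair (g0 g : List (List Int)) (hlen : g.map List.length = g0.map List.length)
    (r c nc : Int) (hr : 0 ≤ r) :
    [(1 : Int), -1].foldl (popStep r c nc) (0, g) =
        popMatches g (g0.length : Int) [(r + 1, nc), (r - 1, nc)] (cellGet g r c) ∧
      ([(1 : Int), -1].foldl (popStep r c nc) (0, g)).2.map List.length = g0.map List.length ∧
      cellGet (([(1 : Int), -1].foldl (popStep r c nc) (0, g)).2) r c = cellGet g r c ∧
      (([(1 : Int), -1].foldl (popStep r c nc) (0, g)).1 ≠ 0 →
        0 ≤ nc ∧ nc < (widthOf g0 : Int)) := by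
  have hrm : r + -1 = r - 1 := by ring
  have hW0 : (((PySem.List.pyGet? g 0).getD []).length : Int) = (widthOf g0 : Int) := by
    exact_mod_cast widthOf_congr g g0 hlen
  rw [popMatches]
  simp only [List.foldl_cons, List.foldl_nil]
  rw [len_congr g g0 hlen]
  have hs1 : popStep r c nc (0, g) 1 =
      (if (decide (0 ≤ r + 1) && decide (r + 1 < (g.length : Int)) && decide (0 ≤ nc) &&
          decide (nc < (((PySem.List.pyGet? g 0).getD []).length : Int)) &&
          (cellGet g (r + 1) nc == cellGet g r c)) = true
       then ((0 : Int) + 1, cellSet g (r + 1) nc 0) else (0, g)) := by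
    rw [popStep_def]; rfl
  rw [hs1]
  by_cases hC1 : (decide (0 ≤ r + 1) && decide (r + 1 < (g.length : Int)) && decide (0 ≤ nc) &&
      decide (nc < (((PySem.List.pyGet? g 0).getD []).length : Int)) &&
      (cellGet g (r + 1) nc == cellGet g r c)) = true
  · have hcomp := hC1
    simp only [Bool.and_eq_true, decide_eq_true_eq] at hcomp
    obtain ⟨⟨⟨⟨hr1, hr2⟩, hnc1⟩, hnc2⟩, -⟩ := hcomp
    have hlen1 : (cellSet g (r + 1) nc 0).map List.length = g0.map List.length := by
      rw [map_length_cellSet _ _ _ _ (by omega)]; exact hlen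
    have hget1 : cellGet (cellSet g (r + 1) nc 0) r c = cellGet g r c :=
      cellGet_cellSet_ne _ _ _ _ _ _ (by omega) hr (by omega)
    have hL1 : ((cellSet g (r + 1) nc 0).length : Int) = (g.length : Int) := by
      rw [← len_congr _ _ hlen1, len_congr _ _ hlen]
    simp only [if_pos hC1]
    have hs2 : popStep r c nc ((0 : Int) + 1, cellSet g (r + 1) nc 0) (-1) =
        (if (decide (0 ≤ r - 1) && decide (r - 1 < (g.length : Int)) && decide (0 ≤ nc) &&
            decide (nc < (((PySem.List.pyGet? (cellSet g (r + 1) nc 0) 0).getD []).length : Int)) &&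
            (cellGet (cellSet g (r + 1) nc 0) (r - 1) nc == cellGet g r c)) = true
         then ((0 : Int) + 1 + 1, cellSet (cellSet g (r + 1) nc 0) (r - 1) nc 0)
         else ((0 : Int) + 1, cellSet g (r + 1) nc 0)) := by
      rw [popStep_def]
      simp only [isValid, hrm, hget1, hL1]
    rw [hs2]
    have hWB : (((PySem.List.pyGet? (cellSet g (r + 1) nc 0) 0).getD []).length : Int) =
        (widthOf g0 : Int) := by
      exact_mod_cast widthOf_congr _ g0 hlen1
    by_cases hC2 : (decide (0 ≤ r - 1) && decide (r - 1 < (g.length : Int)) && decide (0 ≤ nc) &&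
        decide (nc < (((PySem.List.pyGet? (cellSet g (r + 1) nc 0) 0).getD []).length : Int)) &&
        (cellGet (cellSet g (r + 1) nc 0) (r - 1) nc == cellGet g r c)) = true
    · have hcomp2 := hC2
      simp only [Bool.and_eq_true, decide_eq_true_eq] at hcomp2
      obtain ⟨⟨⟨⟨hs1', hs2'⟩, -⟩, -⟩, -⟩ := hcomp2
      simp only [if_pos hC2]
      refine ⟨trivial, ?_, ?_, fun _ => ⟨hnc1, by rw [← hW0]; exact_mod_cast hnc2⟩⟩
      · rw [map_length_cellSet _ _ _ _ (by omega)]; exact hlen1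
      · exact (cellGet_cellSet_ne _ _ _ _ _ _ (by omega) hr (by omega)).trans hget1
    · simp only [if_neg hC2]
      exact ⟨trivial, hlen1, hget1, fun _ => ⟨hnc1, by rw [← hW0]; exact_mod_cast hnc2⟩⟩
  · simp only [if_neg hC1]
    have hs2 : popStep r c nc ((0 : Int), g) (-1) =
        (if (decide (0 ≤ r - 1) && decide (r - 1 < (g.length : Int)) && decide (0 ≤ nc) &&
            decide (nc < (((PySem.List.pyGet? g 0).getD []).length : Int)) &&
            (cellGet g (r - 1) nc == cellGet g r c)) = true
         then ((0 : Int) + 1, cellSet g (r - 1) nc 0)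
         else ((0 : Int), g)) := by
      rw [popStep_def]
      simp only [isValid, hrm]
    rw [hs2]
    by_cases hC2 : (decide (0 ≤ r - 1) && decide (r - 1 < (g.length : Int)) && decide (0 ≤ nc) &&
        decide (nc < (((PySem.List.pyGet? g 0).getD []).length : Int)) &&
        (cellGet g (r - 1) nc == cellGet g r c)) = true
    · have hcomp2 := hC2
      simp only [Bool.and_eq_true, decide_eq_true_eq] at hcomp2
      obtain ⟨⟨⟨⟨hs1', hs2'⟩, hnc1⟩, hnc2⟩, -⟩ := hcomp2
      simp only [if_pos hC2]
      refine ⟨trivial, ?_, ?_, fun _ => ⟨hnc1, by rw [← hW0]; exact_mod_cast hnc2⟩⟩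
      · rw [map_length_cellSet _ _ _ _ (by omega)]; exact hlen
      · exact cellGet_cellSet_ne _ _ _ _ _ _ (by omega) hr (by omega)
    · simp only [if_neg hC2]
      exact ⟨trivial, hlen, trivial, fun h => absurd rfl h⟩
lemma rows_ge (g0 g : List (List Int)) (hlen : g.map List.length = g0.map List.length)
    (hW0 : ∀ row ∈ g0, widthOf g0 ≤ row.length) : ∀ row ∈ g, widthOf g0 ≤ row.length := by
  intro row hrow
  obtain ⟨i, hi, rfl⟩ := List.mem_iff_getElem.mp hrow
  have hlg : g.length = g0.length := by
    have := congrArg List.length hlen; simpa using this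
  have he : g[i].length = (g0[i]'(by omega)).length := by
    have h1 := List.getElem_of_eq hlen (i := i) (by simpa using hi)
    simpa using h1
  rw [he]
  exact hW0 _ (List.getElem_mem _)

lemma grav_if (g0 h : List (List Int)) (p nc : Int)
    (hlenh : h.map List.length = g0.map List.length)
    (hW0 : ∀ row ∈ g0, widthOf g0 ≤ row.length)
    (hnc : p ≠ 0 → 0 ≤ nc ∧ nc < (widthOf g0 : Int)) :
    (if p = 0 then h else swapColumnValues h nc) =
        (if p = 0 then h else applyGravity ((g0.length : Int)) h nc) ∧
      ((if p = 0 then h else swapColumnValues h nc)).map List.length = g0.map List.length := by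
  by_cases hp : p = 0
  · simp only [if_pos hp]
    exact ⟨trivial, hlenh⟩
  · simp only [if_neg hp]
    obtain ⟨hnc0, hncw⟩ := hnc hp
    have hcL : nc = ((nc.toNat : Nat) : Int) := (Int.toNat_of_nonneg hnc0).symm
    have hcLW : nc.toNat < widthOf g0 := by omega
    have hch : ∀ row ∈ h, nc.toNat < row.length := fun row hr =>
      lt_of_lt_of_le hcLW (rows_ge g0 h hlenh hW0 row hr)
    constructor
    · rw [hcL, swap_eq_gravity h nc.toNat hch, ← len_congr _ _ hlenh]
    · rw [hcL, swap_eq_gravity h nc.toNat hch, map_length_gravity h nc.toNat hch]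
      exact hlenh

lemma opStep_eq (g0 g : List (List Int)) (op : List Int)
    (hlen : g.map List.length = g0.map List.length)
    (hW0 : ∀ row ∈ g0, widthOf g0 ≤ row.length)
    (hr0 : 0 ≤ (PySem.List.pyGet? op 0).getD 0)
    (_hr1 : (PySem.List.pyGet? op 0).getD 0 < (g0.length : Int))
    (hc0 : 0 ≤ (PySem.List.pyGet? op 1).getD 0)
    (hc1 : (PySem.List.pyGet? op 1).getD 0 < (widthOf g0 : Int)) :
    opStepA g op = opStepB (g0.length : Int) g op ∧
      (opStepA g op).map List.length = g0.map List.length := by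
  rw [opStepA, opStepB]
  set r := (PySem.List.pyGet? op 0).getD 0 with hrdef
  set c := (PySem.List.pyGet? op 1).getD 0 with hcdef
  obtain ⟨e1, l1, gp1, b1⟩ := popPair g0 g hlen r c (c - 1) hr0
  rw [← e1]
  set lp := [(1 : Int), -1].foldl (popStep r c (c - 1)) (0, g) with hlp
  obtain ⟨e2, l2, gp2, b2⟩ := popPair g0 lp.2 l1 r c (c + 1) hr0
  rw [gp1] at e2
  rw [← e2]
  set rp := [(1 : Int), -1].foldl (popStep r c (c + 1)) (0, lp.2) with hrp
  obtain ⟨e3, l3⟩ := grav_if g0 rp.2 lp.1 (c - 1) l2 hW0 b1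
  rw [← e3]
  set g3 := if lp.1 = 0 then rp.2 else swapColumnValues rp.2 (c - 1) with hg3
  obtain ⟨e4, l4⟩ := grav_if g0 g3 rp.1 (c + 1) l3 hW0 b2
  rw [← e4]
  set g4 := if rp.1 = 0 then g3 else swapColumnValues g3 (c + 1) with hg4
  have hcL : c = ((c.toNat : Nat) : Int) := (Int.toNat_of_nonneg hc0).symm
  have hcLW : c.toNat < widthOf g0 := by omega
  rw [hcL]
  have l5 : (cellSet g4 r ((c.toNat : Nat) : Int) 0).map List.length = g0.map List.length := by
    rw [map_length_cellSet _ _ _ _ hr0]; exact l4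
  have hc5 : ∀ row ∈ cellSet g4 r ((c.toNat : Nat) : Int) 0, c.toNat < row.length := fun row hr =>
    lt_of_lt_of_le hcLW (rows_ge g0 _ l5 hW0 row hr)
  constructor
  · rw [swap_eq_gravity _ c.toNat hc5, ← len_congr _ _ l5]
  · rw [swap_eq_gravity _ c.toNat hc5, map_length_gravity _ c.toNat hc5]
    exact l5
lemma widthOf_headD (g : List (List Int)) : widthOf g = (g.headD []).length := by
  cases g with
  | nil => simp [widthOf, PySem.List.pyGet?]
  | cons a l => rw [widthOf, PySem.List.pyGet?_zero]; simp

lemma opget0 (op : List Int) : (PySem.List.pyGet? op 0).getD 0 = op.getD 0 0 := by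
  rw [PySem.List.pyGet?_zero]
  exact List.getD_eq_getElem?_getD.symm

lemma opget1 (op : List Int) : (PySem.List.pyGet? op 1).getD 0 = op.getD 1 0 := by
  rw [PySem.List.pyGet?_of_nonneg _ (by norm_num)]
  simp [List.getD_eq_getElem?_getD]

lemma fold_eq (g0 : List (List Int)) (ops : List (List Int))
    (hpre : ∀ op ∈ ops, 0 ≤ op.getD 0 0 ∧ op.getD 0 0 < (g0.length : Int) ∧
      0 ≤ op.getD 1 0 ∧ op.getD 1 0 < (widthOf g0 : Int) ∧
      ∀ row ∈ g0, widthOf g0 ≤ row.length) :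
    ∀ g, g.map List.length = g0.map List.length →
      ops.foldl opStepA g = ops.foldl (opStepB (g0.length : Int)) g := by
  induction ops with
  | nil => intro g _; rfl
  | cons op ops ih =>
    intro g hlen
    obtain ⟨⟨h1, h2, h3, h4, h5⟩, hpre'⟩ := List.forall_mem_cons.mp hpre
    obtain ⟨heq, hl⟩ := opStep_eq g0 g op hlen h5 (by rw [opget0]; exact h1)
      (by rw [opget0]; exact h2) (by rw [opget1]; exact h3) (by rw [opget1]; exact h4)
    simp only [List.foldl_cons]
    rw [ih hpre' (opStepA g op) hl, heq]

-- ===== VERDICT (by name: the statement is the Claim_ definition above) =====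
theorem solution_spec : Claim_equal_solution := by
  intro grid operations _hdom hpre
  show solution grid operations = solution_alt grid operations
  rw [solution, solution_alt]
  apply fold_eq grid operations ?_ grid rfl
  intro op hop
  obtain ⟨_, h1, h2, h3, h4, h5⟩ := hpre op hop
  exact ⟨h1, h2, h3, by rw [widthOf_headD]; exact h4,
    fun row hr => by rw [widthOf_headD]; exact h5 row hr⟩
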